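-- pv_equiv track=rewrite | github.com/wara886/kaggle_llm_agentic_legal_ir_2026 | scripts/audit_laws_truncation.py | _bucket_for_signal
-- ===== SOURCE A (Python) =====
-- def _bucket_for_signal(terms: set[str], text: str) -> tuple[str, list[str]]:
--     if not terms:
--         return "no_detectable_query_signal", []
--     lower = (text or "").lower()
--     matches = []
--     best_pos = None
--     for term in terms:
--         pos = lower.find(term)
--         if pos >= 0:
--             matches.append(term)
--             if best_pos is None or pos < best_pos:
--                 best_pos = pos
--     if best_pos is None:
--         return "no_detectable_query_signal", []
--     if best_pos < 500:
--         return "within_500", sorted(matches)[:12]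
--     if best_pos < 900:
--         return "within_900", sorted(matches)[:12]
--     return "beyond_900", sorted(matches)[:12]
-- ===== SOURCE B (Python) =====
-- def _bucket_for_signal(terms, text):
--     if not terms:
--         return "no_detectable_query_signal", []
--     lower = (text or "").lower()
--     matches = sorted(t for t in terms if t in lower)
--     if not matches:
--         return "no_detectable_query_signal", []
--     best = min(lower.find(t) for t in matches)
--     if best < 500:
--         bucket = "within_500"
--     elif best < 900:
--         bucket = "within_900"
--     else:
--         bucket = "beyond_900"
--     return bucket, matches[:12]
-- ===== Notes on version B (the rewrite author's own statement) =====
-- stated objective: idiomatic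
-- what changed: A fuses match collection and the running-minimum position into one accumulator loop over the terms; B is the idiomatic decomposition: filter-and-sort the matching terms by substring membership, then take the builtin min of their find positions.
import Mathlib
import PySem

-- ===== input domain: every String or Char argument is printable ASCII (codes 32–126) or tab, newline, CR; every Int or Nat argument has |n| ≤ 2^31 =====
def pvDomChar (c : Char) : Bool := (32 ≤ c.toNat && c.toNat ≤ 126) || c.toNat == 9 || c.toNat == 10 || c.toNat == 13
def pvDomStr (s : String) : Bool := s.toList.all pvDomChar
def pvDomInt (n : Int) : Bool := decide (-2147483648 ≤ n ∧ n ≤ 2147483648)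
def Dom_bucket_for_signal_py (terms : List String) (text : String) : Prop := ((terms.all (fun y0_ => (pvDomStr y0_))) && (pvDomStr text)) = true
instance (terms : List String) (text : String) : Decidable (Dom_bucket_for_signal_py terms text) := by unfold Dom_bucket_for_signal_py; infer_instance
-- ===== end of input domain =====

-- B replaces A's fused accumulator loop (collect matches + running best position) by the
-- idiomatic decomposition: filter-and-sort the matching terms, then min of their find positions
-- (objective: idiomatic).

-- ===== PORT A =====
-- loop body of A's `for term in terms` (state: (matches, best_pos))
def pvAStep (lower : String) (s : List String × Option Int) (term : String) : List String × Option Int :=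
  let pos := PySem.Str.find lower term
  if 0 ≤ pos then
    (s.1 ++ [term],
      match s.2 with
      | none => some pos
      | some b => if pos < b then some pos else some b)
  else s

def bucket_for_signal_py (terms : List String) (text : String) : String × List String :=
  if terms = [] then ("no_detectable_query_signal", [])
  else
    let lower := PySem.Str.lower (if text = "" then "" else text)
    let st := terms.foldl (pvAStep lower) ([], none)
    match st.2 with
    | none => ("no_detectable_query_signal", [])
    | some best =>
      if best < 500 then
        ("within_500", PySem.List.slice (PySem.List.sorted st.1 (fun t => t) false) none (some 12))
      else if best < 900 then
        ("within_900", PySem.List.slice (PySem.List.sorted st.1 (fun t => t) false) none (some 12))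
      else
        ("beyond_900", PySem.List.slice (PySem.List.sorted st.1 (fun t => t) false) none (some 12))

-- ===== PORT B =====
def bucket_for_signal_py_alt (terms : List String) (text : String) : String × List String :=
  if terms = [] then ("no_detectable_query_signal", [])
  else
    let lower := PySem.Str.lower (if text = "" then "" else text)
    let ms := PySem.List.sorted (terms.filter (fun t => PySem.Str.isIn t lower)) (fun t => t) false
    if ms = [] then ("no_detectable_query_signal", [])
    else
      -- `min(gen)`: matches ≠ [] here, so Python's min returns; the `.getD 0` arm is unreachable
      let best := (PySem.List.min? (ms.map (fun t => PySem.Str.find lower t)) (fun x => x)).getD 0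
      let bucket := if best < 500 then "within_500" else if best < 900 then "within_900" else "beyond_900"
      (bucket, PySem.List.slice ms none (some 12))

-- ===== PRECONDITION & SPEC =====
def Spec_bucket_for_signal_py (terms : List String) (text : String) (out : String × List String) : Prop := out = bucket_for_signal_py_alt terms text
instance (terms : List String) (text : String) (out : String × List String) : Decidable (Spec_bucket_for_signal_py terms text out) := by unfold Spec_bucket_for_signal_py; infer_instance

-- ===== CLAIM (what is proved, stated in full; the proofs are below) =====
def Claim_equal_bucket_for_signal_py : Prop := ∀ (terms : List String) (text : String), Dom_bucket_for_signal_py terms text → Spec_bucket_for_signal_py terms text (bucket_for_signal_py terms text)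

-- ===== LEMMAS AND PROOFS =====

def pvMinStep (lower : String) (o : Option Int) (t : String) : Option Int :=
  if 0 ≤ PySem.Str.find lower t then
    (match o with
     | none => some (PySem.Str.find lower t)
     | some m => if PySem.Str.find lower t < m then some (PySem.Str.find lower t) else some m)
  else o

theorem pvMinStep_neg {lower t : String} (b : Option Int) (h : ¬ 0 ≤ PySem.Str.find lower t) :
    pvMinStep lower b t = b := by
  unfold pvMinStep; rw [if_neg h]

theorem pvMinStep_nn {lower t : String} (h : 0 ≤ PySem.Str.find lower t) :
    pvMinStep lower none t = some (PySem.Str.find lower t) := by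
  unfold pvMinStep; rw [if_pos h]

theorem pvMinStep_sm {lower t : String} (x : Int) (h : 0 ≤ PySem.Str.find lower t) :
    pvMinStep lower (some x) t
      = if PySem.Str.find lower t < x then some (PySem.Str.find lower t) else some x := by
  unfold pvMinStep; rw [if_pos h]

theorem pvMinStep_some (lower : String) : ∀ (ts : List String) (x : Int),
    ∃ y, ts.foldl (pvMinStep lower) (some x) = some y ∧ y ≤ x := by
  intro ts
  induction ts with
  | nil => exact fun x => ⟨x, rfl, le_refl x⟩
  | cons t ts ih =>
    intro x
    rw [List.foldl_cons]
    by_cases h : 0 ≤ PySem.Str.find lower t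
    · rw [pvMinStep_sm x h]
      by_cases h2 : PySem.Str.find lower t < x
      · rw [if_pos h2]
        obtain ⟨y, hy, hle⟩ := ih (PySem.Str.find lower t)
        exact ⟨y, hy, le_trans hle (le_of_lt h2)⟩
      · rw [if_neg h2]; exact ih x
    · rw [pvMinStep_neg _ h]; exact ih x

-- A's fold splits into the filtered match list and a running minimum of finds
theorem pvFold_eq (lower : String) : ∀ (ts : List String) (acc : List String) (b : Option Int),
    ts.foldl (pvAStep lower) (acc, b)
      = (acc ++ ts.filter (fun t => decide (0 ≤ PySem.Str.find lower t)),
         ts.foldl (pvMinStep lower) b) := by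
  intro ts
  induction ts with
  | nil => simp
  | cons t ts ih =>
    intro acc b
    rw [List.foldl_cons, List.foldl_cons, List.filter_cons]
    by_cases h : 0 ≤ PySem.Str.find lower t
    · have hA : pvAStep lower (acc, b) t
          = (acc ++ [t], pvMinStep lower b t) := by
        unfold pvAStep pvMinStep
        rw [if_pos h, if_pos h]
      rw [hA, ih]
      have : decide (0 ≤ PySem.Str.find lower t) = true := by simpa using h
      rw [this]
      simp
    · have hA : pvAStep lower (acc, b) t = (acc, b) := by
        unfold pvAStep
        rw [if_neg h]
      rw [hA, ih]
      have : decide (0 ≤ PySem.Str.find lower t) = false := by simpa using h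
      rw [this]
      rw [pvMinStep_neg _ h]
      simp

-- the running minimum: none iff no term matches
theorem pvMin_none (lower : String) (ts : List String) :
    ts.foldl (pvMinStep lower) none = none ↔ ∀ t ∈ ts, ¬ 0 ≤ PySem.Str.find lower t := by
  induction ts with
  | nil => simp
  | cons t ts ih =>
    rw [List.foldl_cons]
    constructor
    · intro h
      by_cases hp : 0 ≤ PySem.Str.find lower t
      · exfalso
        rw [pvMinStep_nn hp] at h
        obtain ⟨y, hy, _⟩ := pvMinStep_some lower ts (PySem.Str.find lower t)
        rw [h] at hy
        simp at hy
      · rw [pvMinStep_neg _ hp] at h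
        intro x hx
        rcases List.mem_cons.mp hx with rfl | hx
        · exact hp
        · exact ih.mp h x hx
    · intro h
      rw [pvMinStep_neg _ (h t List.mem_cons_self)]
      exact ih.mpr (fun x hx => h x (List.mem_cons_of_mem _ hx))

-- the running minimum is achieved by some matching term and bounds all of them
theorem pvMin_spec (lower : String) : ∀ (ts : List String) (b : Option Int) (m : Int),
    ts.foldl (pvMinStep lower) b = some m →
    ((b = some m ∨ ∃ t ∈ ts, 0 ≤ PySem.Str.find lower t ∧ PySem.Str.find lower t = m) ∧
     (∀ t ∈ ts, 0 ≤ PySem.Str.find lower t → m ≤ PySem.Str.find lower t) ∧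
     (∀ x, b = some x → m ≤ x)) := by
  intro ts
  induction ts with
  | nil => intro b m h; simp_all
  | cons t ts ih =>
    intro b m h
    rw [List.foldl_cons] at h
    by_cases hp : 0 ≤ PySem.Str.find lower t
    · rcases b with _ | x
      · rw [pvMinStep_nn hp] at h
        obtain ⟨h1, h2, h3⟩ := ih _ m h
        refine ⟨?_, ?_, by simp⟩
        · rcases h1 with h1 | ⟨u, hu, hu2⟩
          · exact Or.inr ⟨t, List.mem_cons_self, hp, Option.some_inj.mp h1⟩
          · exact Or.inr ⟨u, List.mem_cons_of_mem _ hu, hu2⟩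
        · intro u hu hpu
          rcases List.mem_cons.mp hu with rfl | hu
          · exact h3 _ rfl
          · exact h2 u hu hpu
      · rw [pvMinStep_sm x hp] at h
        by_cases hlt : PySem.Str.find lower t < x
        · rw [if_pos hlt] at h
          obtain ⟨h1, h2, h3⟩ := ih _ m h
          refine ⟨?_, ?_, ?_⟩
          · rcases h1 with h1 | ⟨u, hu, hu2⟩
            · exact Or.inr ⟨t, List.mem_cons_self, hp, Option.some_inj.mp h1⟩
            · exact Or.inr ⟨u, List.mem_cons_of_mem _ hu, hu2⟩
          · intro u hu hpu
            rcases List.mem_cons.mp hu with rfl | hu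
            · exact h3 _ rfl
            · exact h2 u hu hpu
          · intro y hy
            rw [Option.some_inj.mp hy.symm]
            exact le_of_lt (lt_of_le_of_lt (h3 _ rfl) hlt)
        · rw [if_neg hlt] at h
          obtain ⟨h1, h2, h3⟩ := ih _ m h
          refine ⟨?_, ?_, ?_⟩
          · rcases h1 with h1 | ⟨u, hu, hu2⟩
            · exact Or.inl h1
            · exact Or.inr ⟨u, List.mem_cons_of_mem _ hu, hu2⟩
          · intro u hu hpu
            rcases List.mem_cons.mp hu with rfl | hu
            · exact le_trans (h3 _ rfl) (not_lt.mp hlt)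
            · exact h2 u hu hpu
          · exact h3
    · rw [pvMinStep_neg _ hp] at h
      obtain ⟨h1, h2, h3⟩ := ih _ m h
      refine ⟨?_, ?_, h3⟩
      · rcases h1 with h1 | ⟨u, hu, hu2⟩
        · exact Or.inl h1
        · exact Or.inr ⟨u, List.mem_cons_of_mem _ hu, hu2⟩
      · intro u hu hpu
        rcases List.mem_cons.mp hu with rfl | hu
        · exact absurd hpu hp
        · exact h2 u hu hpu

theorem bucket_for_signal_py_spec : Claim_equal_bucket_for_signal_py := by
  intro terms text _
  unfold Spec_bucket_for_signal_py bucket_for_signal_py bucket_for_signal_py_alt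
  by_cases hT : terms = []
  · simp [hT]
  · simp only [if_neg hT]
    set lower := PySem.Str.lower (if text = "" then "" else text) with hlow
    have hIF : ∀ t, PySem.Str.isIn t lower = decide (0 ≤ PySem.Str.find lower t) := by
      intro t
      rw [Bool.eq_iff_iff]
      simp only [decide_eq_true_eq]
      rw [PySem.Str.isIn_iff_infix, PySem.Str.find_nonneg_iff]
    have hfilter : terms.filter (fun t => PySem.Str.isIn t lower)
        = terms.filter (fun t => decide (0 ≤ PySem.Str.find lower t)) :=
      List.filter_congr (fun t _ => hIF t)
    rw [pvFold_eq, hfilter]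
    rcases hE : List.foldl (pvMinStep lower) none terms with _ | m
    · -- no term occurs in the text: both return the sentinel
      have hnil : terms.filter (fun t => decide (0 ≤ PySem.Str.find lower t)) = [] := by
        rw [List.filter_eq_nil_iff]
        intro t ht
        simpa using (pvMin_none lower terms).mp hE t ht
      rw [hnil]
      simp [PySem.List.sorted_eq_nil_iff]
    · -- best position m: B's min over the matched terms' finds is exactly m
      obtain ⟨h1, h2, _⟩ := pvMin_spec lower terms none m hE
      rcases h1 with h1 | ⟨t, htmem, htp, htm⟩
      · exact absurd h1 (by simp)
      set M := PySem.List.sorted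
          (terms.filter (fun u => decide (0 ≤ PySem.Str.find lower u))) (fun t => t) false with hM
      have hmem_M : ∀ u, u ∈ M ↔ u ∈ terms ∧ 0 ≤ PySem.Str.find lower u := by
        intro u
        rw [hM, PySem.List.mem_sorted, List.mem_filter]
        simp
      have htM : t ∈ M := (hmem_M t).mpr ⟨htmem, htp⟩
      have hMne : ¬ M = [] := fun h0 => by rw [h0] at htM; simp at htM
      have hbest : (PySem.List.min? (M.map (fun u => PySem.Str.find lower u)) (fun x => x)).getD 0 = m := by
        rcases hmin : PySem.List.min? (M.map (fun u => PySem.Str.find lower u)) (fun x => x) with _ | m'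
        · exfalso
          rw [PySem.List.min?_eq_none_iff, List.map_eq_nil_iff] at hmin
          exact hMne hmin
        · have hmem' := PySem.List.min?_mem hmin
          obtain ⟨u, huM, hum'⟩ := List.mem_map.mp hmem'
          obtain ⟨humem, hup⟩ := (hmem_M u).mp huM
          have hmle : m ≤ m' := hum' ▸ h2 u humem hup
          have hle : m' ≤ m := by
            have := PySem.List.min?_isMin hmin (PySem.Str.find lower t)
              (List.mem_map.mpr ⟨t, htM, rfl⟩)
            rw [htm] at this
            exact this
          simp [le_antisymm hle hmle]
      rw [if_neg hMne, hbest]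
      simp only [List.nil_append, ← hM]
      by_cases g1 : m < 500
      · simp [g1]
      · by_cases g2 : m < 900 <;> simp [g1, g2]
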